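-- pv_equiv track=rewrite | github.com/rohhamh/aut-information-retrieval-final-project | src/tokenization_utils.py | merge_positional_indices
-- ===== SOURCE A (Python) =====
-- def merge_positional_indices(
--     raw_tokens,
--     stemmed_tokens,
--     positions: dict[str, list[int]],
-- ):
--     new_tokens_counts: dict[str, int] = dict()
--     new_positions: dict[str, list[int]] = dict()
--     for rt, st in zip(raw_tokens, stemmed_tokens):
--         if st not in new_positions:
--             new_positions[st] = []
--         new_positions[st] += positions[rt]
--     for t in new_positions.keys():
--         new_positions[t] = sorted(list(set(new_positions[t])))
--         new_tokens_counts[t] = len(new_positions[t])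
--     return new_tokens_counts, new_positions
-- ===== SOURCE B (Python) =====
-- def merge_positional_indices(
--     raw_tokens,
--     stemmed_tokens,
--     positions: dict[str, list[int]],
-- ):
--     pairs = list(zip(raw_tokens, stemmed_tokens))
--     order = list(dict.fromkeys(st for _, st in pairs))
--     new_positions: dict[str, list[int]] = {}
--     for st in order:
--         merged: list[int] = []
--         for p in sorted(p for rt, s in pairs if s == st for p in positions[rt]):
--             if not merged or merged[-1] != p:
--                 merged.append(p)
--         new_positions[st] = merged
--     new_tokens_counts = {st: len(ps) for st, ps in new_positions.items()}
--     return new_tokens_counts, new_positions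
-- ===== Notes on version B (the rewrite author's own statement) =====
-- stated objective: alternative
-- what changed: B replaces A's incremental dict-grouping (accumulate per-key lists while scanning, then per-key set+sort) by first computing the distinct stemmed tokens in order of first occurrence, then for each such token gathering its positions by filtering the zipped pairs, sorting them and collapsing adjacent duplicates in one sweep instead of building a set.
import Mathlib
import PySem

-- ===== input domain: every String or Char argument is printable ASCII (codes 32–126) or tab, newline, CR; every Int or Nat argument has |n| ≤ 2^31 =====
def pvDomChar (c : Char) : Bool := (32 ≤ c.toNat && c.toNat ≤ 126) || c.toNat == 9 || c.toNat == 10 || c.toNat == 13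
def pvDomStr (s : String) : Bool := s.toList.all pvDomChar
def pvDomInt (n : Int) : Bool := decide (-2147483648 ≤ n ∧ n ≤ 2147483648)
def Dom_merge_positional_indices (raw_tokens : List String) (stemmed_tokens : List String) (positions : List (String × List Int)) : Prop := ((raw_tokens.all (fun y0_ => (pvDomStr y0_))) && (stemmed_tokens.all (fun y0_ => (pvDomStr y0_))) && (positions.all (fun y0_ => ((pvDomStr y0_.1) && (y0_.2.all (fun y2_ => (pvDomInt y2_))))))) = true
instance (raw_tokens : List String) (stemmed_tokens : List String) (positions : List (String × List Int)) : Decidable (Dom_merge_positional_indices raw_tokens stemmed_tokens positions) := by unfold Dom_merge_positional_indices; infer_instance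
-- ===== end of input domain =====

-- B computes the distinct stemmed tokens first and gathers/sorts each token's positions by filtering the
-- pairs and collapsing adjacent duplicates of the sorted list, instead of A's incremental dict grouping
-- followed by a per-key set+sort (objective: alternative decomposition, same result).

-- ===== PORT A =====
def merge_positional_indices (raw_tokens : List String) (stemmed_tokens : List String) (positions : List (String × List Int)) : (List (String × Int)) × (List (String × List Int)) :=
  -- positions[rt] raises KeyError when rt is not a key of positions: Pre_ excludes exactly those
  -- inputs, so inside Pre_ this getD is the Python dict lookup.
  let new_positions : PySem.Dict String (List Int) :=
    (raw_tokens.zip stemmed_tokens).foldl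
      (fun np p =>
        let np' := if np.contains p.2 then np else np.insert p.2 []
        np'.insert p.2 (np'.getD p.2 [] ++ PySem.Dict.getD ⟨positions⟩ p.1 []))
      ⟨[]⟩
  let fin :=
    new_positions.keys.foldl
      (fun (acc : PySem.Dict String Int × PySem.Dict String (List Int)) t =>
        let v := PySem.List.sorted (PySem.Set.ofList (acc.2.getD t [])) (fun x => x) false
        (acc.1.insert t (v.length : Int), acc.2.insert t v))
      (⟨[]⟩, new_positions)
  (fin.1.items, fin.2.items)

-- ===== PORT B =====
def merge_positional_indices_alt (raw_tokens : List String) (stemmed_tokens : List String) (positions : List (String × List Int)) : (List (String × Int)) × (List (String × List Int)) :=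
  -- same KeyError remark as for A: B's positions[rt] is excluded by Pre_ where rt is not a key
  let pairs := raw_tokens.zip stemmed_tokens
  let order := PySem.List.dedup (pairs.map (fun p => p.2))
  let new_positions : PySem.Dict String (List Int) :=
    order.foldl
      (fun d st =>
        let merged :=
          (PySem.List.sorted
              ((pairs.filter (fun p => p.2 == st)).flatMap
                (fun p => PySem.Dict.getD ⟨positions⟩ p.1 []))
              (fun x => x) false).foldl
            (fun m q => if m.isEmpty || m.getLast? != some q then m ++ [q] else m) []
        d.insert st merged)
      ⟨[]⟩
  let new_tokens_counts : PySem.Dict String Int :=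
    new_positions.items.foldl (fun c it => c.insert it.1 (it.2.length : Int)) ⟨[]⟩
  (new_tokens_counts.items, new_positions.items)

-- ===== PRECONDITION & SPEC =====
-- Pre_ excludes exactly the inputs on which Python A raises KeyError: some raw token that is zipped
-- with a stemmed token is not a key of positions (B raises there too).
def Pre_merge_positional_indices (raw_tokens : List String) (stemmed_tokens : List String) (positions : List (String × List Int)) : Prop :=
  ∀ p ∈ raw_tokens.zip stemmed_tokens, p.1 ∈ positions.map Prod.fst
instance (raw_tokens : List String) (stemmed_tokens : List String) (positions : List (String × List Int)) : Decidable (Pre_merge_positional_indices raw_tokens stemmed_tokens positions) := by unfold Pre_merge_positional_indices; infer_instance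

def pvWitness_merge_positional_indices : List String × List String × (List (String × List Int)) :=
  (["ab", "x", "ab"], ["a", "a", "b"], [("ab", [2, 1, 2]), ("x", [0])])

def Spec_merge_positional_indices (raw_tokens : List String) (stemmed_tokens : List String) (positions : List (String × List Int)) (out : (List (String × Int)) × (List (String × List Int))) : Prop := out = merge_positional_indices_alt raw_tokens stemmed_tokens positions
instance (raw_tokens : List String) (stemmed_tokens : List String) (positions : List (String × List Int)) (out : (List (String × Int)) × (List (String × List Int))) : Decidable (Spec_merge_positional_indices raw_tokens stemmed_tokens positions out) := by unfold Spec_merge_positional_indices; infer_instance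

-- ===== CLAIM (what is proved, stated in full; the proofs are below) =====
def Claim_equal_merge_positional_indices : Prop := ∀ (raw_tokens : List String) (stemmed_tokens : List String) (positions : List (String × List Int)), Dom_merge_positional_indices raw_tokens stemmed_tokens positions → Pre_merge_positional_indices raw_tokens stemmed_tokens positions → Spec_merge_positional_indices raw_tokens stemmed_tokens positions (merge_positional_indices raw_tokens stemmed_tokens positions)


-- ===== LEMMAS AND PROOFS =====

-- all positions of the raw tokens whose stemmed form is k, in pair order
def pvGather (pos : String → List Int) (pairs : List (String × String)) (k : String) : List Int :=
  (pairs.filter (fun p => p.2 == k)).flatMap (fun p => pos p.1)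

theorem pvDict_contains {ν : Type} (ks : List String) (g : String → ν) (k0 : String) :
    (PySem.Dict.mk (ks.map (fun k => (k, g k)))).contains k0 = decide (k0 ∈ ks) := by
  simp [PySem.Dict.contains, List.any_map]
  induction ks with
  | nil => simp
  | cons a t ih =>
    by_cases h : a = k0
    · simp [h, ih]
    · have h' : ¬ k0 = a := fun hh => h hh.symm
      simp [h, h', ih]

theorem pvDict_getD {ν : Type} (ks : List String) (g : String → ν) (k0 : String) (dflt : ν) (h : k0 ∈ ks) :
    (PySem.Dict.mk (ks.map (fun k => (k, g k)))).getD k0 dflt = g k0 := by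
  simp [PySem.Dict.getD, PySem.Dict.get?, List.find?_map]
  induction ks with
  | nil => simp at h
  | cons a t ih =>
    by_cases ha : a = k0
    · subst ha; simp
    · simp [ha] at h ⊢
      exact ih (h.resolve_left (fun hh => ha hh.symm))

theorem pvDict_insert_mem {ν : Type} (ks : List String) (g : String → ν) (k0 : String) (v : ν) (h : k0 ∈ ks) :
    (PySem.Dict.mk (ks.map (fun k => (k, g k)))).insert k0 v
      = PySem.Dict.mk (ks.map (fun k => (k, if k = k0 then v else g k))) := by
  simp [PySem.Dict.insert, h, List.map_map]
  intro a _
  by_cases hk : a = k0 <;> simp [hk]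

theorem pvDict_insert_notmem {ν : Type} (ks : List String) (g : String → ν) (k0 : String) (v : ν) (h : k0 ∉ ks) :
    (PySem.Dict.mk (ks.map (fun k => (k, g k)))).insert k0 v
      = PySem.Dict.mk ((ks ++ [k0]).map (fun k => (k, if k = k0 then v else g k))) := by
  simp [PySem.Dict.insert, h]
  intro a ha he
  exact absurd (he ▸ ha) h

theorem pvFoldA (pos : String → List Int) :
    ∀ (pairs : List (String × String)) (ks : List String) (g : String → List Int),
    (pairs.foldl
      (fun np p =>
        let np' := if np.contains p.2 then np else np.insert p.2 []
        np'.insert p.2 (np'.getD p.2 [] ++ pos p.1))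
      (PySem.Dict.mk (ks.map (fun k => (k, g k))))).items
    = ((pairs.map Prod.snd).foldl PySem.Set.add ks).map
        (fun k => (k, (if k ∈ ks then g k else []) ++ pvGather pos pairs k)) := by
  intro pairs
  induction pairs with
  | nil =>
    intro ks g
    simp only [List.foldl_nil, List.map_nil]
    refine (List.map_congr_left (fun a ha => ?_)).symm
    simp [ha, pvGather]
  | cons p rest ih =>
    intro ks g
    simp only [List.foldl_cons, List.map_cons]
    by_cases hmem : p.2 ∈ ks
    · rw [show (PySem.Dict.mk (ks.map (fun k => (k, g k)))).contains p.2 = true by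
        rw [pvDict_contains]; simp [hmem]]
      simp only [if_true]
      rw [pvDict_getD ks g p.2 [] hmem, pvDict_insert_mem ks g p.2 _ hmem]
      rw [ih ks (fun k => if k = p.2 then g p.2 ++ pos p.1 else g k)]
      rw [show PySem.Set.add ks p.2 = ks by simp [PySem.Set.add, PySem.Set.contains, hmem]]
      congr 1
      funext k
      simp only [pvGather]
      by_cases hk : k = p.2
      · subst hk; simp [hmem]
      · have hk' : ¬ p.2 = k := fun h => hk h.symm
        simp [hk, hk']
    · rw [show (PySem.Dict.mk (ks.map (fun k => (k, g k)))).contains p.2 = false by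
        rw [pvDict_contains]; simp [hmem]]
      simp only [Bool.false_eq_true, if_false]
      rw [pvDict_insert_notmem ks g p.2 [] hmem]
      rw [pvDict_getD (ks ++ [p.2]) _ p.2 [] (by simp)]
      rw [pvDict_insert_mem (ks ++ [p.2]) _ p.2 _ (by simp)]
      rw [ih (ks ++ [p.2]) _]
      rw [show PySem.Set.add ks p.2 = ks ++ [p.2] by
        simp [PySem.Set.add, PySem.Set.contains, hmem]]
      congr 1
      funext k
      simp only [pvGather]
      by_cases hk : k = p.2
      · subst hk; simp [hmem]
      · have hk' : ¬ p.2 = k := fun h => hk h.symm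
        simp [hk, hk', List.mem_append]

theorem pvFoldInsert {ν : Type} (G : String → ν) :
    ∀ (ks cs : List String) (g : String → ν), ks.Nodup → (∀ k ∈ ks, k ∉ cs) →
    (ks.foldl (fun d k => d.insert k (G k)) (PySem.Dict.mk (cs.map (fun k => (k, g k)))))
      = PySem.Dict.mk ((cs ++ ks).map (fun k => (k, if k ∈ ks then G k else g k))) := by
  intro ks
  induction ks with
  | nil => intro cs g _ _; simp
  | cons t ks' ih =>
    intro cs g hnd hdisj
    simp only [List.foldl_cons]
    rw [pvDict_insert_notmem cs g t (G t) (hdisj t (by simp))]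
    rw [ih (cs ++ [t]) _ hnd.of_cons (fun k hk => by
      have h1 := hdisj k (List.mem_cons_of_mem _ hk)
      have h2 : k ≠ t := fun he => (List.nodup_cons.mp hnd).1 (he ▸ hk)
      simp [h1, h2])]
    congr 1
    rw [show cs ++ t :: ks' = cs ++ [t] ++ ks' by simp]
    refine List.map_congr_left (fun a ha => ?_)
    have hnt : t ∉ ks' := (List.nodup_cons.mp hnd).1
    by_cases h1 : a ∈ ks'
    · have h2 : a ≠ t := fun he => hnt (he ▸ h1)
      simp [h1, h2]
    · by_cases h2 : a = t
      · subst h2; simp [hnt]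
      · simp [h1, h2]

theorem pvFold2 :
    ∀ (ks cs K : List String) (h : String → Int) (f : String → List Int),
    ks.Nodup → (∀ k ∈ ks, k ∈ K) → (∀ k ∈ ks, k ∉ cs) →
    (ks.foldl
      (fun (acc : PySem.Dict String Int × PySem.Dict String (List Int)) t =>
        let v := PySem.List.sorted (PySem.Set.ofList (acc.2.getD t [])) (fun x => x) false
        (acc.1.insert t (v.length : Int), acc.2.insert t v))
      (PySem.Dict.mk (cs.map (fun k => (k, h k))), PySem.Dict.mk (K.map (fun k => (k, f k)))))
    = (PySem.Dict.mk ((cs ++ ks).map (fun k => (k, if k ∈ ks then ((PySem.List.sorted (PySem.Set.ofList (f k)) (fun x => x) false).length : Int) else h k))),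
       PySem.Dict.mk (K.map (fun k => (k, if k ∈ ks then PySem.List.sorted (PySem.Set.ofList (f k)) (fun x => x) false else f k)))) := by
  intro ks
  induction ks with
  | nil =>
    intro cs K h f _ _ _
    simp only [List.foldl_nil, List.append_nil, List.not_mem_nil, if_false]
  | cons t ks' ih =>
    intro cs K h f hnd hsub hdisj
    have hnt : t ∉ ks' := (List.nodup_cons.mp hnd).1
    simp only [List.foldl_cons]
    rw [pvDict_getD K f t [] (hsub t (by simp))]
    rw [pvDict_insert_notmem cs h t _ (hdisj t (by simp))]
    rw [pvDict_insert_mem K f t _ (hsub t (by simp))]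
    rw [ih (cs ++ [t]) K _ _ hnd.of_cons
      (fun k hk => hsub k (List.mem_cons_of_mem _ hk))
      (fun k hk => by
        have h1 := hdisj k (List.mem_cons_of_mem _ hk)
        have h2 : k ≠ t := fun he => hnt (he ▸ hk)
        simp [h1, h2])]
    have hcs : ∀ a ∈ cs, a ≠ t ∧ a ∉ ks' := fun a ha =>
      ⟨fun he => hdisj t (by simp) (he ▸ ha), fun hk => hdisj a (List.mem_cons_of_mem _ hk) ha⟩
    refine congrArg₂ Prod.mk ?_ ?_
    · refine congrArg PySem.Dict.mk ?_
      rw [show cs ++ t :: ks' = cs ++ [t] ++ ks' by simp]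
      refine List.map_congr_left (fun a ha => ?_)
      by_cases h1 : a ∈ ks'
      · have h2 : a ≠ t := fun he => hnt (he ▸ h1)
        simp [h1, h2]
      · by_cases h2 : a = t
        · subst h2; simp [hnt]
        · simp [h1, h2]
    · refine congrArg PySem.Dict.mk ?_
      refine List.map_congr_left (fun a ha => ?_)
      by_cases h2 : a = t
      · subst h2; simp [hnt]
      · by_cases h1 : a ∈ ks' <;> simp [h1, h2]

theorem pvLe_getLast? (m : List Int) (l : Int) (hp : m.Pairwise (· < ·)) (hl : m.getLast? = some l) :
    ∀ a ∈ m, a ≤ l := by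
  induction m with
  | nil => simp
  | cons x t ih =>
    intro a ha
    cases t with
    | nil =>
      simp at hl ha
      omega
    | cons y u =>
      rw [List.getLast?_cons_cons] at hl
      rcases List.mem_cons.mp ha with h | h
      · subst h
        have hy : a < y := (List.pairwise_cons.mp hp).1 y (by simp)
        have := ih hp.of_cons hl y (by simp)
        omega
      · exact ih hp.of_cons hl a h

theorem pvAdjFold :
    ∀ (s m : List Int), s.Pairwise (· ≤ ·) → m.Pairwise (· < ·) → (∀ b ∈ s, ∀ a ∈ m, a ≤ b) →
    (s.foldl (fun m q => if m.isEmpty || m.getLast? != some q then m ++ [q] else m) m).Pairwise (· < ·)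
      ∧ ∀ x, (x ∈ s.foldl (fun m q => if m.isEmpty || m.getLast? != some q then m ++ [q] else m) m ↔ x ∈ m ∨ x ∈ s) := by
  intro s
  induction s with
  | nil => intro m _ hm _; simpa using hm
  | cons q s' ih =>
    intro m hs hm hms
    have hq : ∀ b ∈ s', q ≤ b := (List.pairwise_cons.mp hs).1
    simp only [List.foldl_cons]
    by_cases hc : (m.isEmpty || m.getLast? != some q) = true
    · rw [if_pos hc]
      have hlt : ∀ a ∈ m, a < q := by
        intro a ha
        cases hg : m.getLast? with
        | none => simp [List.getLast?_eq_none_iff.mp hg] at ha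
        | some l =>
          have hne : l ≠ q := by
            rcases Bool.or_eq_true_iff.mp hc with h | h
            · simp [List.isEmpty_iff.mp h] at ha
            · intro he; rw [hg, he] at h; simp at h
          have hlm : l ∈ m := by
            rcases List.getLast?_eq_some_iff.mp hg with ⟨m', hm'⟩
            simp [hm']
          have h1 : a ≤ l := pvLe_getLast? m l hm hg a ha
          have h2 : l ≤ q := hms q (by simp) l hlm
          omega
      have hm' : (m ++ [q]).Pairwise (· < ·) := by
        rw [List.pairwise_append]
        exact ⟨hm, by simp, by simpa using hlt⟩
      have hms' : ∀ b ∈ s', ∀ a ∈ m ++ [q], a ≤ b := by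
        intro b hb a ha
        rcases List.mem_append.mp ha with h | h
        · exact hms b (List.mem_cons_of_mem _ hb) a h
        · simp at h; subst h; exact hq b hb
      obtain ⟨hp, hmem⟩ := ih (m ++ [q]) hs.of_cons hm' hms'
      refine ⟨hp, fun x => ?_⟩
      rw [hmem x]
      simp [List.mem_append, or_assoc, List.mem_cons]
    · rw [if_neg hc]
      have hqm : q ∈ m := by
        have h2 : m.getLast? = some q := by
          simp at hc; exact hc.2
        rcases List.getLast?_eq_some_iff.mp h2 with ⟨m', hm'⟩
        simp [hm']
      obtain ⟨hp, hmem⟩ := ih m hs.of_cons hm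
        (fun b hb a ha => hms b (List.mem_cons_of_mem _ hb) a ha)
      refine ⟨hp, fun x => ?_⟩
      rw [hmem x]
      constructor
      · tauto
      · rintro (h | h)
        · exact Or.inl h
        · rcases List.mem_cons.mp h with h | h
          · exact Or.inl (h ▸ hqm)
          · exact Or.inr h

theorem pvAdjDedup (l : List Int) :
    (PySem.List.sorted l (fun x => x) false).foldl
      (fun m q => if m.isEmpty || m.getLast? != some q then m ++ [q] else m) []
    = PySem.List.sorted (PySem.Set.ofList l) (fun x => x) false := by
  have hs : (PySem.List.sorted l (fun x => x) false).Pairwise (· ≤ ·) := by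
    simpa using PySem.List.sorted_pairwise (xs := l) (key := fun x => x)
  obtain ⟨hp, hmem⟩ := pvAdjFold (PySem.List.sorted l (fun x => x) false) [] hs (by simp) (by simp)
  refine (PySem.List.sorted_eq_of_perm_of_pairwise_lt _ _ (fun x => x) ?_ ?_).symm
  · refine (List.perm_ext_iff_of_nodup ?_ ?_).mpr ?_
    · exact hp.imp ne_of_lt
    · exact PySem.Set.nodup_ofList l
    · intro a
      rw [hmem a]
      simp [PySem.Set.mem_ofList, PySem.List.mem_sorted]
  · simpa using hp

theorem pvDict_keys {ν : Type} (ks : List String) (g : String → ν) :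
    (PySem.Dict.mk (ks.map (fun k => (k, g k)))).keys = ks := by
  simp [PySem.Dict.keys, Function.comp_def]

theorem pvFoldCounts (V : String → List Int) (ks : List String) (hnd : ks.Nodup) :
    ((ks.map (fun k => (k, V k))).foldl (fun c it => c.insert it.1 (it.2.length : Int)) (PySem.Dict.mk []))
      = PySem.Dict.mk (ks.map (fun k => (k, ((V k).length : Int)))) := by
  rw [List.foldl_map]
  have h := pvFoldInsert (fun k => ((V k).length : Int)) ks [] (fun _ => 0) hnd (by simp)
  simp only [List.map_nil, List.nil_append] at h
  rw [h]
  congr 1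
  exact List.map_congr_left fun a ha => by simp [ha]

-- ===== VERDICT (by name: the statement is the Claim_ definition above) =====
theorem merge_positional_indices_spec : Claim_equal_merge_positional_indices := by
  unfold Claim_equal_merge_positional_indices
  intro rts sts positions _ _
  unfold Spec_merge_positional_indices merge_positional_indices merge_positional_indices_alt
  simp only []
  have hK_nodup : (((rts.zip sts).map Prod.snd).foldl PySem.Set.add []).Nodup := by
    rw [← PySem.Set.ofList_eq_foldl]; exact PySem.Set.nodup_ofList _
  have h1 := pvFoldA (fun rt => (PySem.Dict.mk positions).getD rt []) (rts.zip sts) [] (fun _ => [])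
  simp only [List.map_nil, List.not_mem_nil, if_false, List.nil_append] at h1
  have e1 : (List.foldl
      (fun np p =>
        (if np.contains p.2 = true then np else np.insert p.2 []).insert p.2
          ((if np.contains p.2 = true then np else np.insert p.2 []).getD p.2 [] ++
            (PySem.Dict.mk positions).getD p.1 []))
      (PySem.Dict.mk []) (rts.zip sts))
      = PySem.Dict.mk (((((rts.zip sts).map Prod.snd).foldl PySem.Set.add [])).map
          (fun k => (k, pvGather (fun rt => (PySem.Dict.mk positions).getD rt []) (rts.zip sts) k))) :=
    congrArg PySem.Dict.mk h1
  rw [e1, pvDict_keys]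
  have h2 := pvFold2 (((rts.zip sts).map Prod.snd).foldl PySem.Set.add []) [] (((rts.zip sts).map Prod.snd).foldl PySem.Set.add []) (fun _ => (0 : Int))
      (fun k => pvGather (fun rt => (PySem.Dict.mk positions).getD rt []) (rts.zip sts) k) hK_nodup (fun k hk => hk) (by simp)
  simp only [List.map_nil, List.nil_append] at h2
  rw [h2]
  have horder : PySem.List.dedup (List.map (fun p => p.2) (rts.zip sts)) = (((rts.zip sts).map Prod.snd).foldl PySem.Set.add []) := by
    rw [PySem.List.dedup_eq_ofList, PySem.Set.ofList_eq_foldl]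
  rw [horder]
  have hB1 := pvFoldInsert (fun st => (PySem.List.sorted ((List.filter (fun p => p.2 == st) (rts.zip sts)).flatMap (fun p => (PySem.Dict.mk positions).getD p.1 [])) (fun x => x) false).foldl (fun m q => if m.isEmpty || m.getLast? != some q then m ++ [q] else m) []) (((rts.zip sts).map Prod.snd).foldl PySem.Set.add []) [] (fun _ => ([] : List Int)) hK_nodup (by simp)
  simp only [List.map_nil, List.nil_append] at hB1
  rw [hB1]
  have hc := pvFoldCounts (fun k => if k ∈ (((rts.zip sts).map Prod.snd).foldl PySem.Set.add []) then (fun st => (PySem.List.sorted ((List.filter (fun p => p.2 == st) (rts.zip sts)).flatMap (fun p => (PySem.Dict.mk positions).getD p.1 [])) (fun x => x) false).foldl (fun m q => if m.isEmpty || m.getLast? != some q then m ++ [q] else m) []) k else []) (((rts.zip sts).map Prod.snd).foldl PySem.Set.add []) hK_nodup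
  simp only [] at hc
  rw [hc]
  refine congrArg₂ Prod.mk ?_ ?_
  · refine List.map_congr_left (fun k hk => ?_)
    simp only [if_pos hk, pvAdjDedup, pvGather]
  · refine List.map_congr_left (fun k hk => ?_)
    simp only [if_pos hk, pvAdjDedup, pvGather]
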